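-- pv_equiv track=rewrite | github.com/pulsar2105/Zebra | compiler/parser.py | determine_lower_para_influences
-- ===== SOURCE A (Python) =====
-- def determine_lower_para_influences(tokens):
--     parentheses_influence = 0
--     influences = []
--
--     for t in  tokens:
--         if t == "(":
--             parentheses_influence += 1
--             influences.append(parentheses_influence)
--         elif t == ")":
--             influences.append(parentheses_influence)
--             parentheses_influence -= 1
--         else:
--             influences.append(parentheses_influence)
--
--     # si le niveau d'influence des parenthèses est supérieur à 0
--     # on soustrait 1, n fois
--     if min(influences) > 0:
--         for i in range(min(influences)):
--             tokens = tokens[1:-1]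
--             for iflu in range(len(influences)):
--                 influences[iflu] = influences[iflu] - 1
--
--         return tokens, min(influences), influences
--
--     return tokens, min(influences), influences
-- ===== SOURCE B (Python) =====
-- def determine_lower_para_influences(tokens):
--     level = 0
--     influences = []
--     for t in tokens:
--         if t == "(":
--             level += 1
--         influences.append(level)
--         if t == ")":
--             level -= 1
--     m = min(influences)
--     if m > 0:
--         return tokens[m:len(tokens) - m], 0, [x - m for x in influences]
--     return tokens, m, influences
-- ===== Notes on version B (the rewrite author's own statement) =====
-- stated objective: alternative
-- what changed: Replaces A's peel-off loop (min(influences) rounds of tokens[1:-1] plus a full decrement pass over influences each round) with a single slice tokens[m:len-m] and one subtraction pass over influences; since the first influence is at most 1 the loop runs at most once, so the cost is the same.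
-- outside the precondition, e.g. on determine_lower_para_influences([]): A raises ValueError, B raises ValueError
import Mathlib
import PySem

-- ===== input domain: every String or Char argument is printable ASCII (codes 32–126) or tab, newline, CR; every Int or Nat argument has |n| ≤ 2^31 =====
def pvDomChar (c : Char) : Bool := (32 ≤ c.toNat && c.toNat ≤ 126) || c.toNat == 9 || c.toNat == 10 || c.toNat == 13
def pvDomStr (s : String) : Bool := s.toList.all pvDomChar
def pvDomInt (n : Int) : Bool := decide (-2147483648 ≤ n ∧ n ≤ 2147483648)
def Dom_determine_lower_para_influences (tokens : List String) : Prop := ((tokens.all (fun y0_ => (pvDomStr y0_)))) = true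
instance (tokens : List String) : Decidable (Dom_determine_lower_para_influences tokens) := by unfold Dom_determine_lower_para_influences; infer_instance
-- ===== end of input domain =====

-- B replaces A's repeated peel-off loop (min(influences) rounds of tokens[1:-1] plus a full
-- decrement pass each round) by a single slice tokens[m:len-m] and one subtraction pass.

-- ===== PORT A =====
-- the for-loop over tokens: state = (parentheses_influence, influences)
def dlpiStepA (s : Int × List Int) (t : String) : Int × List Int :=
  if t = "(" then (s.1 + 1, s.2 ++ [s.1 + 1])
  else if t = ")" then (s.1 - 1, s.2 ++ [s.1])
  else (s.1, s.2 ++ [s.1])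

-- 'for i in range(min(influences)): tokens = tokens[1:-1]; influences[iflu] -= 1 for all iflu'
def dlpiStripA : Nat → List String × List Int → List String × List Int
  | 0, s => s
  | n + 1, (toks, infl) =>
      dlpiStripA n (PySem.List.slice toks (some 1) (some (-1)), infl.map (· - 1))

def determine_lower_para_influences (tokens : List String) : List String × Int × List Int :=
  let s := tokens.foldl dlpiStepA (0, [])
  let influences := s.2
  match PySem.List.min? influences (fun x => x) with
  | none => ([], 0, [])   -- min([]) raises ValueError: excluded by Pre_
  | some m =>
    if m > 0 then
      let r := dlpiStripA m.toNat (tokens, influences)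
      (r.1, (PySem.List.min? r.2 (fun x => x)).getD 0, r.2)
    else (tokens, m, influences)

-- ===== PORT B =====
-- single loop: bump level on '(', append, drop level after ')'
def dlpiStepB (s : Int × List Int) (t : String) : Int × List Int :=
  let level := if t = "(" then s.1 + 1 else s.1
  (if t = ")" then level - 1 else level, s.2 ++ [level])

def determine_lower_para_influences_alt (tokens : List String) : List String × Int × List Int :=
  let s := tokens.foldl dlpiStepB (0, [])
  let influences := s.2
  match PySem.List.min? influences (fun x => x) with
  | none => ([], 0, [])   -- min([]) raises ValueError: excluded by Pre_
  | some m =>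
    if m > 0 then
      (PySem.List.slice tokens (some m) (some (PySem.List.len tokens - m)), 0,
       influences.map (· - m))
    else (tokens, m, influences)

-- ===== PRECONDITION & SPEC =====
-- A raises ValueError (min of an empty list) on tokens = []; excluded.
def Pre_determine_lower_para_influences (tokens : List String) : Prop := tokens ≠ []
instance (tokens : List String) : Decidable (Pre_determine_lower_para_influences tokens) := by unfold Pre_determine_lower_para_influences; infer_instance
def pvWitness_determine_lower_para_influences : List String := ["(", "x", ")"]

def Spec_determine_lower_para_influences (tokens : List String) (out : List String × Int × List Int) : Prop := out = determine_lower_para_influences_alt tokens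
instance (tokens : List String) (out : List String × Int × List Int) : Decidable (Spec_determine_lower_para_influences tokens out) := by unfold Spec_determine_lower_para_influences; infer_instance

-- ===== CLAIM (what is proved, stated in full; the proofs are below) =====
def Claim_equal_determine_lower_para_influences : Prop := ∀ (tokens : List String), Dom_determine_lower_para_influences tokens → Pre_determine_lower_para_influences tokens → Spec_determine_lower_para_influences tokens (determine_lower_para_influences tokens)

-- ===== LEMMAS AND PROOFS =====

-- the two loop bodies are extensionally equal
theorem dlpiStep_eq : dlpiStepA = dlpiStepB := by
  funext s t
  simp only [dlpiStepA, dlpiStepB]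
  by_cases h1 : t = "(" <;> by_cases h2 : t = ")" <;> simp_all

-- direct description of the influences list
def dlpiInfl : Int → List String → List Int
  | _, [] => []
  | l, t :: ts =>
      let lv := if t = "(" then l + 1 else l
      lv :: dlpiInfl (if t = ")" then lv - 1 else lv) ts

theorem foldl_stepB_snd (ts : List String) (l : Int) (acc : List Int) :
    (ts.foldl dlpiStepB (l, acc)).2 = acc ++ dlpiInfl l ts := by
  induction ts generalizing l acc with
  | nil => simp [dlpiInfl]
  | cons t ts ih => simp [dlpiStepB, dlpiInfl, ih]

-- the first influence is at most 1, so min(influences) ≤ 1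
theorem min_le_one (t : String) (ts : List String)
    (m : Int)
    (hm : PySem.List.min? ((List.foldl dlpiStepB (0, []) (t :: ts)).2) (fun x => x) = some m) :
    m ≤ 1 := by
  rw [foldl_stepB_snd, List.nil_append] at hm
  have hmem : (if t = "(" then (1:Int) else 0) ∈ dlpiInfl 0 (t :: ts) := by
    by_cases h : t = "(" <;> simp [dlpiInfl, h]
  have hle := PySem.List.min?_isMin hm _ hmem
  by_cases h : t = "(" <;> simp [h] at hle <;> omega

-- min of a shifted list is the shifted min
theorem foldl_min_sub (t : List Int) (x c : Int) :
    (t.map (· - c)).foldl min (x - c) = t.foldl min x - c := by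
  induction t generalizing x with
  | nil => simp
  | cons y ys ih => simpa [min_sub_sub_right] using ih (min x y)

theorem min?_map_sub (xs : List Int) (c m : Int)
    (h : PySem.List.min? xs (fun x => x) = some m) :
    PySem.List.min? (xs.map (· - c)) (fun x => x) = some (m - c) := by
  cases xs with
  | nil => have := PySem.List.min?_mem h; simp at this
  | cons x t =>
    rw [PySem.List.min?_id_cons] at h
    simp only [List.map_cons, PySem.List.min?_id_cons, foldl_min_sub,
      Option.some.inj h]

-- ===== VERDICT (by name: the statement is the Claim_ definition above) =====
theorem determine_lower_para_influences_spec : Claim_equal_determine_lower_para_influences := by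
  intro tokens _ hpre
  unfold Spec_determine_lower_para_influences
  cases hmin : PySem.List.min? ((tokens.foldl dlpiStepB (0, [])).2) (fun x => x) with
  | none =>
    simp [determine_lower_para_influences, determine_lower_para_influences_alt, dlpiStep_eq, hmin]
  | some m =>
    by_cases hpos : m > 0
    · have hm1 : m = 1 := by
        obtain ⟨t, ts, rfl⟩ := List.exists_cons_of_ne_nil hpre
        have := min_le_one t ts m hmin
        omega
      subst hm1
      have hstrip : dlpiStripA (1:Int).toNat (tokens, (tokens.foldl dlpiStepB (0, [])).2)
          = (PySem.List.slice tokens (some 1) (some (-1)),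
             ((tokens.foldl dlpiStepB (0, [])).2).map (· - 1)) := rfl
      have hmin' := min?_map_sub ((tokens.foldl dlpiStepB (0, [])).2) 1 1 hmin
      simp only [determine_lower_para_influences, determine_lower_para_influences_alt,
        dlpiStep_eq, hmin, hstrip, hmin', sub_self, gt_iff_lt, zero_lt_one, if_pos,
        Option.getD_some]
      -- tokens[1:-1] = tokens[1:len-1]
      have hsl : PySem.List.slice tokens (some 1) (some (-1))
          = PySem.List.slice tokens (some 1) (some ((PySem.List.len tokens) - 1)) := by
        simp [PySem.List.slice, PySem.List.clampIdx]
        rcases tokens with _ | ⟨x, t⟩ <;> simp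
      rw [hsl]
    · simp only [determine_lower_para_influences, determine_lower_para_influences_alt,
        dlpiStep_eq, hmin]
      rw [if_neg hpos, if_neg hpos]
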